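-- pv_equiv track=rewrite | github.com/fawq/PythonAGH | zad2.py | colorEditor
-- ===== SOURCE A (Python) =====
-- def colorEditor(color, palette):
--     if color[0] != "#":  # If color is not hex form
--         if (color[0] == "("):  # If color is (?,?,?) form
--             colors = list(map(hex, map(int, color[1:-1].split(","))))
--             return "#" + colors[0][2:] + colors[1][2:] + colors[2][2:]
--         else:  # If color is from palette
--             return colorEditor(palette[color], palette)
--     else:  # If color is hex form
--         return color
-- ===== SOURCE B (Python) =====
-- def colorEditor(color, palette):
--     # Phase 1: iteratively resolve palette names until a terminal form is reached.
--     while color[0] != "#" and color[0] != "(":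
--         color = palette[color]
--     # Phase 2: the terminal form is either hex already, or an "(r,g,b)" string.
--     if color[0] == "#":
--         return color
--     out = "#"
--     for part in color[1:-1].split(",")[:3]:
--         out += hex(int(part))[2:]
--     return out
-- ===== Notes on version B (the rewrite author's own statement) =====
-- stated objective: alternative
-- what changed: Splits A's one-shot recursive dispatch into two phases: an iterative while-loop that only resolves palette names until a terminal form, followed by a separate formatting pass that folds the first three comma fields into an accumulating hex string, instead of A's recursion plus materialised list indexed at 0,1,2.
import Mathlib
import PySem

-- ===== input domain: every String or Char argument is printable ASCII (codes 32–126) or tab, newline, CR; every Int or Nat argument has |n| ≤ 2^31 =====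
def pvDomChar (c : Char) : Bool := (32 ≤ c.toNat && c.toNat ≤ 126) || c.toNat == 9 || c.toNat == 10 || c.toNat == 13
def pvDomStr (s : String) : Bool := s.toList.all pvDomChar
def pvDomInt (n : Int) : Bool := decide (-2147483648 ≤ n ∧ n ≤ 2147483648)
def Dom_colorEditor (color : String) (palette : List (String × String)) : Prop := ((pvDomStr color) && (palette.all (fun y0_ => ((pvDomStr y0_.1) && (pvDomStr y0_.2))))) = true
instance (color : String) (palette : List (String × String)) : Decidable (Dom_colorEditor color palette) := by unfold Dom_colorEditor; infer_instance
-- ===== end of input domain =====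

-- B splits A's recursive dispatch into two phases: an iterative name-resolution loop and a
-- separate hex-formatting accumulation pass; objective: alternative. Equivalence is about the return value.

-- Shared ports of Python builtins (exact on ints / dict lookup):
-- hex(n): '0x…' in lowercase, '-0x…' for negatives.
def pvHexDigit (n : Nat) : Char := if n < 10 then Char.ofNat (48 + n) else Char.ofNat (87 + n)

def pvHexDigits (n : Nat) : List Char :=
  if h : n = 0 then [] else pvHexDigits (n / 16) ++ [pvHexDigit (n % 16)]
decreasing_by exact Nat.div_lt_self (Nat.pos_of_ne_zero h) (by norm_num)

def pvHex (i : Int) : List Char :=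
  if i < 0 then '-' :: '0' :: 'x' :: pvHexDigits (-i).toNat
  else if i = 0 then ['0', 'x', '0']
  else '0' :: 'x' :: pvHexDigits i.toNat

-- palette[color]: dict lookup (first match; Pre_ restricts to duplicate-free key lists).
def pvLookup (palette : List (String × String)) (c : String) : Option String :=
  (palette.find? (fun kv => kv.1 == c)).map (·.2)

-- ===== PORT A =====
-- Recursive, as A; fuel (= palette.length + 1 bounds the lookup chain under Pre_) only makes
-- the same computation total; [] stands for the raising branches (Index/Value/KeyError), all outside Pre_.
def colorEditorGo (palette : List (String × String)) : Nat → List Char → List Char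
  | 0, _ => []
  | fuel + 1, color =>
    match PySem.List.pyGet? color 0 with
    | none => []                          -- IndexError on color[0]
    | some ch =>
      if ch ≠ '#' then
        if ch = '(' then
          let parts := PySem.Chars.splitOn (PySem.List.slice color (some 1) (some (-1))) [',']
          if parts.all (fun p => (PySem.Int.ofChars? p).isSome) then
            let colors := parts.map (fun p => pvHex ((PySem.Int.ofChars? p).getD 0))
            match PySem.List.pyGet? colors 0, PySem.List.pyGet? colors 1, PySem.List.pyGet? colors 2 with
            | some c0, some c1, some c2 => '#' :: (c0.drop 2 ++ c1.drop 2 ++ c2.drop 2)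
            | _, _, _ => []               -- IndexError on colors[0..2]
          else []                         -- ValueError in int()
        else
          match pvLookup palette (String.ofList color) with
          | some v => colorEditorGo palette fuel v.toList
          | none => []                    -- KeyError
      else color

def colorEditor (color : String) (palette : List (String × String)) : String :=
  String.ofList (colorEditorGo palette (palette.length + 1) color.toList)

-- ===== PORT B =====
-- Phase 1: the while-loop, resolving names only (fuel makes the loop total; none = a raising run).
def pvResolveLoop (palette : List (String × String)) : Nat → List Char → Option (List Char)
  | 0, _ => none
  | fuel + 1, color =>
    match PySem.List.pyGet? color 0 with
    | none => none                        -- IndexError on color[0]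
    | some ch =>
      if ch = '#' ∨ ch = '(' then some color     -- loop condition fails: fall through
      else
        match pvLookup palette (String.ofList color) with
        | some v => pvResolveLoop palette fuel v.toList
        | none => none                    -- KeyError

-- Phase 2: the for-loop over the first three comma fields, accumulating out += hex(int(part))[2:].
def pvHexFold : List (List Char) → List Char → List Char
  | [], out => out
  | part :: rest, out =>
    match PySem.Int.ofChars? part with
    | some n => pvHexFold rest (out ++ (pvHex n).drop 2)
    | none => []                          -- ValueError in int()

def colorEditor_alt (color : String) (palette : List (String × String)) : String :=
  match pvResolveLoop palette (palette.length + 1) color.toList with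
  | none => ""
  | some t =>
    if PySem.List.pyGet? t 0 = some '#' then String.ofList t
    else String.ofList (pvHexFold ((PySem.Chars.splitOn (PySem.List.slice t (some 1) (some (-1))) [',']).take 3) ['#'])

-- ===== PRECONDITION & SPEC =====
-- the '(r,g,b)' form A returns on: at least three comma fields, all parsing as Python ints.
def pvGoodParen (cs : List Char) : Bool :=
  let parts := PySem.Chars.splitOn (PySem.List.slice cs (some 1) (some (-1))) [',']
  decide (3 ≤ parts.length) && parts.all (fun p => (PySem.Int.ofChars? p).isSome)

-- A returns iff the lookup chain from color reaches a '#…' or well-formed '(…)' string.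
-- Each lookup on a returning run consumes a distinct palette key, so the chain is stated by
-- recursion that erases the consulted entry; the counter mirrors the shrinking palette length
-- only to make the recursion structural (it never truncates a chain on which A returns),
-- and nothing here runs either port.
def pvResolvesGo (n : Nat) (palette : List (String × String)) (color : String) : Bool :=
  match color.toList with
  | [] => false
  | ch :: _ =>
    if ch = '#' then true
    else if ch = '(' then pvGoodParen color.toList
    else
      match n with
      | 0 => false
      | n + 1 =>
        match palette.find? (fun kv => kv.1 == color) with
        | none => false
        | some kv => pvResolvesGo n (palette.eraseP (fun kv => kv.1 == color)) kv.2

def pvResolves (palette : List (String × String)) (color : String) : Bool :=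
  pvResolvesGo palette.length palette color

-- Pre_ excludes (a) inputs where A raises (no color[0], a key missing from the palette, a cyclic
-- chain (RecursionError), a '(…)' form with fewer than three fields or a field int() rejects), and
-- (b) palettes with duplicate keys, where the association list's first-match lookup is an
-- accidental stand-in for Python's last-wins dict construction (a defensible corner).
def Pre_colorEditor (color : String) (palette : List (String × String)) : Prop :=
  (palette.map Prod.fst).Nodup ∧ pvResolves palette color = true
instance (color : String) (palette : List (String × String)) : Decidable (Pre_colorEditor color palette) := by unfold Pre_colorEditor; infer_instance

def pvWitness_colorEditor : String × (List (String × String)) := ("red", [("red", "(11,2,3)")])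

def Spec_colorEditor (color : String) (palette : List (String × String)) (out : String) : Prop := out = colorEditor_alt color palette
instance (color : String) (palette : List (String × String)) (out : String) : Decidable (Spec_colorEditor color palette out) := by unfold Spec_colorEditor; infer_instance

-- ===== CLAIM (what is proved, stated in full; the proofs are below) =====
def Claim_equal_colorEditor : Prop := ∀ (color : String) (palette : List (String × String)), Dom_colorEditor color palette → Pre_colorEditor color palette → Spec_colorEditor color palette (colorEditor color palette)

-- ===== LEMMAS AND PROOFS =====

-- the states A's chain can be in, counted by remaining lookups, over the FULL palette
def pvChain (palette : List (String × String)) : Nat → List Char → Prop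
  | 0, cs => cs.head? = some '#' ∨ (cs.head? = some '(' ∧ pvGoodParen cs = true)
  | n + 1, cs => ∃ ch v, cs.head? = some ch ∧ ch ≠ '#' ∧ ch ≠ '(' ∧
      pvLookup palette (String.ofList cs) = some v ∧ pvChain palette n v.toList

theorem pvLookup_of_mem {palette : List (String × String)} {kv : String × String} {c : String}
    (hnd : (palette.map Prod.fst).Nodup) (hm : kv ∈ palette) (hk : kv.1 = c) :
    palette.find? (fun e => e.1 == c) = some kv := by
  induction palette with
  | nil => cases hm
  | cons x xs ih =>
    simp only [List.map_cons, List.nodup_cons] at hnd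
    rcases List.mem_cons.mp hm with rfl | hm'
    · exact List.find?_cons_of_pos (by simpa using hk)
    · have hx : ¬ (x.1 == c) = true := by
        intro hbeq
        exact hnd.1 (by
          have hxc : x.1 = c := by simpa using hbeq
          rw [hxc, ← hk]
          exact List.mem_map_of_mem hm')
      rw [show List.find? (fun e => e.1 == c) (x :: xs) = List.find? (fun e => e.1 == c) xs from
        List.find?_cons_of_neg hx]
      exact ih hnd.2 hm'

theorem pvResolvesGo_chain {p : List (String × String)} (hnd : (p.map Prod.fst).Nodup) :
    ∀ (m : Nat) (p' : List (String × String)) (c : String), p'.Sublist p →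
      pvResolvesGo m p' c = true → ∃ n, n ≤ m ∧ pvChain p n c.toList := by
  intro m
  induction m with
  | zero =>
    intro p' c hs hr
    rw [pvResolvesGo] at hr
    split at hr
    · cases hr
    · rename_i ch rest hcs
      split_ifs at hr with hch hcp
      · exact ⟨0, Nat.le_refl _, Or.inl (by rw [hcs, hch]; rfl)⟩
      · exact ⟨0, Nat.le_refl _, Or.inr ⟨by rw [hcs, hcp]; rfl, hr⟩⟩
  | succ m ih =>
    intro p' c hs hr
    rw [pvResolvesGo] at hr
    split at hr
    · cases hr
    · rename_i ch rest hcs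
      split_ifs at hr with hch hcp
      · exact ⟨0, Nat.zero_le _, Or.inl (by rw [hcs, hch]; rfl)⟩
      · exact ⟨0, Nat.zero_le _, Or.inr ⟨by rw [hcs, hcp]; rfl, hr⟩⟩
      · split at hr
        · cases hr
        · rename_i kv hfind
          have hmem : kv ∈ p' := List.mem_of_find?_eq_some hfind
          have hkey : kv.1 = c := by simpa using List.find?_some hfind
          obtain ⟨n, hn, hchain⟩ := ih _ kv.2 ((List.eraseP_sublist).trans hs) hr
          refine ⟨n + 1, by omega, ?_⟩
          refine ⟨ch, kv.2, by rw [hcs]; rfl, hch, hcp, ?_, hchain⟩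
          have hofl : String.ofList c.toList = c := by simp
          rw [hofl, pvLookup, pvLookup_of_mem hnd (hs.subset hmem) hkey]
          rfl

theorem pv_three_le {α : Type} {l : List α} (h : 3 ≤ l.length) :
    ∃ a b c r, l = a :: b :: c :: r := by
  match l, h with
  | a :: b :: c :: r, _ => exact ⟨a, b, c, r, rfl⟩

theorem pvChain_eq {p : List (String × String)} :
    ∀ (n : Nat) (cs : List Char) (fuel : Nat), pvChain p n cs → n < fuel →
      colorEditorGo p fuel cs =
        (match pvResolveLoop p fuel cs with
         | none => []
         | some t =>
           if PySem.List.pyGet? t 0 = some '#' then t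
           else pvHexFold ((PySem.Chars.splitOn (PySem.List.slice t (some 1) (some (-1))) [',']).take 3) ['#']) := by
  intro n
  induction n with
  | zero =>
    intro cs fuel hc hf
    obtain ⟨f, rfl⟩ : ∃ f, fuel = f + 1 := ⟨fuel - 1, by omega⟩
    rcases hc with hhex | ⟨hpar, hgood⟩
    · have h0 : PySem.List.pyGet? cs 0 = some '#' := by
        rw [PySem.List.pyGet?_zero, ← List.head?_eq_getElem?, hhex]
      rw [colorEditorGo, pvResolveLoop, h0]
      simp [h0]
    · have h0 : PySem.List.pyGet? cs 0 = some '(' := by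
        rw [PySem.List.pyGet?_zero, ← List.head?_eq_getElem?, hpar]
      unfold pvGoodParen at hgood
      simp only [Bool.and_eq_true, decide_eq_true_eq] at hgood
      obtain ⟨hlen, hall⟩ := hgood
      obtain ⟨p0, p1, p2, rest, hS⟩ := pv_three_le hlen
      rw [hS] at hall
      simp only [List.all_cons, Bool.and_eq_true] at hall
      obtain ⟨hp0, hp1, hp2, hrest⟩ := hall
      obtain ⟨n0, hn0⟩ := Option.isSome_iff_exists.mp hp0
      obtain ⟨n1, hn1⟩ := Option.isSome_iff_exists.mp hp1
      obtain ⟨n2, hn2⟩ := Option.isSome_iff_exists.mp hp2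
      have hrhs : pvResolveLoop p (f + 1) cs = some cs := by
        rw [pvResolveLoop, h0]; simp
      rw [hrhs]
      simp only [h0, reduceCtorEq, if_neg (by decide : ¬ ((('(' : Char) : Char) = '#'))]
      rw [colorEditorGo, h0]
      simp only [hS]
      norm_num [hp0, hp1, hp2, hrest, PySem.List.pyGet?, PySem.List.pyIdx?]
      rw [if_neg (by decide : ¬ (('(' : Char) = '#')), if_neg (by decide : ¬ (('(' : Char) = '#'))]
      rw [if_pos (by omega : (0:Int) ≤ (rest.length:Int) + 1 + 1),
          if_pos (by omega : (0:Int) ≤ (rest.length:Int) + 1),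
          if_pos (by omega : (2:Int) ≤ (rest.length:Int) + 1 + 1)]
      simp [List.take, pvHexFold, hn0, hn1, hn2, List.append_assoc]
  | succ n ih =>
    intro cs fuel hc hf
    obtain ⟨f, rfl⟩ : ∃ f, fuel = f + 1 := ⟨fuel - 1, by omega⟩
    obtain ⟨ch, v, hhead, hne, hnp, hlook, hchain⟩ := hc
    have h0 : PySem.List.pyGet? cs 0 = some ch := by
      rw [PySem.List.pyGet?_zero, ← List.head?_eq_getElem?, hhead]
    rw [colorEditorGo, pvResolveLoop, h0]
    simp only [if_pos hne, if_neg hnp, hne, hnp, hlook, if_neg, or_self, if_false]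
    exact ih v.toList f hchain (by omega)

-- ===== VERDICT (by name: the statement is the Claim_ definition above) =====
theorem colorEditor_spec : Claim_equal_colorEditor := by
  intro color palette _ hpre
  obtain ⟨hnd, hres⟩ := hpre
  obtain ⟨n, hn, hchain⟩ := pvResolvesGo_chain hnd palette.length palette color (List.Sublist.refl _) hres
  unfold Spec_colorEditor colorEditor colorEditor_alt
  rw [pvChain_eq n color.toList (palette.length + 1) hchain (by omega)]
  cases h : pvResolveLoop palette (palette.length + 1) color.toList with
  | none => rfl
  | some t => exact apply_ite String.ofList _ _ _
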